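-- pv_equiv track=rewrite | github.com/asheorann/bioinformatics_algorithms | 07_Detecting_Mutations/7.7_Burrows_Wheeler_Transform_Construction.py | addSubscript
-- ===== SOURCE A (Python) =====
-- def addSubscript(transform):
--     counts={}
--     ans=""
--     for a in transform:
--         if a in counts:
--             counts[a]+=1
--         else:
--             counts[a]=1
--         ans+=a+str(counts[a])
--     return ans
-- ===== SOURCE B (Python) =====
-- def addSubscript(transform):
--     return "".join(c + str(transform[:i + 1].count(c))
--                    for i, c in enumerate(transform))
-- ===== Notes on version B (the rewrite author's own statement) =====
-- stated objective: simpler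
-- what changed: Replaces the running-count dict and string accumulator with a one-line join over enumerate, computing each subscript as the character's count in the prefix transform[:i+1].
import Mathlib
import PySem

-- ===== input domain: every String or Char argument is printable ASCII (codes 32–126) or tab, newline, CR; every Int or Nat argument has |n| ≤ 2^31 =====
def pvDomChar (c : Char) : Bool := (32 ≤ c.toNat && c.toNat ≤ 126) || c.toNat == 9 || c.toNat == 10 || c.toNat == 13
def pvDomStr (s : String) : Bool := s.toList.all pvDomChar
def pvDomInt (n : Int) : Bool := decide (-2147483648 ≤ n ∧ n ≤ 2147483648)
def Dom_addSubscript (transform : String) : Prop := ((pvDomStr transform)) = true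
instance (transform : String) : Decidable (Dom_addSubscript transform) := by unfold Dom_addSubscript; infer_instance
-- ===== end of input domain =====

-- B replaces A's running-count dict and string accumulator with a single join over
-- enumerate, computing each subscript as the count of the character in the prefix
-- transform[:i+1] (objective: simpler).

-- ===== PORT A =====
-- one loop iteration of A: update counts for a, then append a + str(counts[a])
def addSubscriptStep (st : PySem.Dict Char Int × List Char) (a : Char) :
    PySem.Dict Char Int × List Char :=
  let counts := if st.1.contains a then st.1.insert a (st.1.getD a 0 + 1)
                else st.1.insert a 1
  (counts, st.2 ++ a :: PySem.Int.toChars (counts.getD a 0))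

def addSubscript (transform : String) : String :=
  String.ofList (transform.toList.foldl addSubscriptStep (PySem.Dict.empty, [])).2

-- ===== PORT B =====
def addSubscript_alt (transform : String) : String :=
  String.ofList (PySem.Chars.join []
    ((PySem.List.enumerate transform.toList 0).map (fun p =>
      p.2 :: PySem.Int.toChars ((PySem.List.slice transform.toList none (some (p.1 + 1))).count p.2))))

-- ===== PRECONDITION & SPEC =====
def Spec_addSubscript (transform : String) (out : String) : Prop := out = addSubscript_alt transform
instance (transform : String) (out : String) : Decidable (Spec_addSubscript transform out) := by unfold Spec_addSubscript; infer_instance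

-- ===== CLAIM (what is proved, stated in full; the proofs are below) =====
def Claim_equal_addSubscript : Prop := ∀ (transform : String), Dom_addSubscript transform → Spec_addSubscript transform (addSubscript transform)

-- ===== LEMMAS AND PROOFS =====

-- common specification: emit each character followed by its count in the prefix so far
def addSubscriptSpecGo : List Char → List Char → List Char
  | _, [] => []
  | pre, a :: rest =>
      (a :: PySem.Int.toChars ((pre.count a : Int) + 1)) ++ addSubscriptSpecGo (pre ++ [a]) rest

lemma aLoop_eq_specGo (cs : List Char) : ∀ (pre : List Char) (d : PySem.Dict Char Int)
    (acc : List Char), (∀ c, d.getD c 0 = (pre.count c : Int)) →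
    (cs.foldl addSubscriptStep (d, acc)).2 = acc ++ addSubscriptSpecGo pre cs := by
  induction cs with
  | nil => intro pre d acc _; simp [addSubscriptSpecGo]
  | cons a rest ih =>
    intro pre d acc hinv
    have hd : (if d.contains a then d.insert a (d.getD a 0 + 1) else d.insert a 1)
        = d.insert a (d.getD a 0 + 1) := by
      by_cases h : d.contains a = true
      · simp [h]
      · have h0 : d.getD a 0 = 0 :=
          PySem.Dict.getD_of_not_contains d 0 (by simpa using h)
        simp [h, h0]
    have hinv' : ∀ c, (d.insert a (d.getD a 0 + 1)).getD c 0 = ((pre ++ [a]).count c : Int) := by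
      intro c
      rw [PySem.Dict.getD_insert]
      by_cases hc : c = a
      · subst hc; simp [hinv c, List.count_append]
      · simp [hc, hinv c, List.count_append, Ne.symm hc]
    simp only [List.foldl_cons, addSubscriptStep, hd]
    rw [ih (pre ++ [a]) _ _ hinv']
    rw [PySem.Dict.getD_insert_self, hinv a]
    simp [addSubscriptSpecGo, List.append_assoc]

lemma bGo_eq_specGo (cs0 : List Char) : ∀ (k n : Nat), n ≤ cs0.length → cs0.length - n = k →
    PySem.Chars.join []
      ((PySem.List.enumerate (cs0.drop n) (n : Int)).map (fun p =>
        p.2 :: PySem.Int.toChars ((PySem.List.slice cs0 none (some (p.1 + 1))).count p.2)))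
    = addSubscriptSpecGo (cs0.take n) (cs0.drop n) := by
  intro k
  induction k with
  | zero =>
    intro n hle hk
    have hn : n = cs0.length := by omega
    subst hn
    simp [addSubscriptSpecGo, PySem.Chars.join, List.intercalate]
  | succ k ih =>
    intro n hle hk
    have hlt : n < cs0.length := by omega
    have hdrop : cs0.drop n = cs0[n] :: cs0.drop (n + 1) :=
      List.drop_eq_getElem_cons hlt
    have htake : cs0.take (n + 1) = cs0.take n ++ [cs0[n]] := by
      rw [List.take_add_one]; simp [List.getElem?_eq_getElem hlt]
    have hslice : PySem.List.slice cs0 none (some ((n + 1 : Nat) : Int)) = cs0.take (n + 1) :=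
      PySem.List.slice_to_natCast cs0 (n + 1)
    have hcount : ((cs0.take (n + 1)).count cs0[n] : Int)
        = ((cs0.take n).count cs0[n] : Int) + 1 := by
      rw [htake, List.count_append]; push_cast; simp
    rw [hdrop, PySem.List.enumerate_cons]
    simp only [List.map_cons]
    have hn1 : (n : Int) + 1 = ((n + 1 : Nat) : Int) := by push_cast; ring
    rw [show PySem.Chars.join []
          ((cs0[n] :: PySem.Int.toChars ((PySem.List.slice cs0 none (some ((n:Int) + 1))).count cs0[n])) ::
            (PySem.List.enumerate (cs0.drop (n+1)) ((n:Int)+1)).map (fun p =>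
              p.2 :: PySem.Int.toChars ((PySem.List.slice cs0 none (some (p.1 + 1))).count p.2)))
        = (cs0[n] :: PySem.Int.toChars ((PySem.List.slice cs0 none (some ((n:Int) + 1))).count cs0[n])) ++
          PySem.Chars.join []
            ((PySem.List.enumerate (cs0.drop (n+1)) ((n:Int)+1)).map (fun p =>
              p.2 :: PySem.Int.toChars ((PySem.List.slice cs0 none (some (p.1 + 1))).count p.2)))
        from by
          cases h : (PySem.List.enumerate (cs0.drop (n+1)) ((n:Int)+1)).map (fun p =>
              p.2 :: PySem.Int.toChars ((PySem.List.slice cs0 none (some (p.1 + 1))).count p.2)) with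
          | nil => simp [PySem.Chars.join, List.intercalate]
          | cons x xs => simp [PySem.Chars.join_cons_cons]]
    rw [hn1, ih (n + 1) (by omega) (by omega), hslice, hcount]
    conv_rhs => rw [addSubscriptSpecGo]
    rw [← htake]

-- ===== VERDICT (by name: the statement is the Claim_ definition above) =====
theorem addSubscript_spec : Claim_equal_addSubscript := by
  intro transform _
  unfold Spec_addSubscript addSubscript addSubscript_alt
  rw [aLoop_eq_specGo transform.toList [] PySem.Dict.empty []
        (fun c => by simp [PySem.Dict.getD_empty])]
  rw [show ((0 : Int) = ((0 : Nat) : Int)) from rfl]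
  rw [show PySem.List.enumerate transform.toList ((0:Nat):Int)
        = PySem.List.enumerate (transform.toList.drop 0) ((0:Nat):Int) from by simp]
  rw [bGo_eq_specGo transform.toList transform.toList.length 0 (by omega) (by omega)]
  simp
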